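-- pv_equiv track=rewrite | github.com/brendenrossin/SecondBrain | src/secondbrain/scripts/project_sync.py | _build_notes_section
-- ===== SOURCE A (Python) =====
-- def _build_notes_section(mentions: list[tuple[str, str]]) -> list[str]:
--     """Build a bullet list of recent notes mentioning the project."""
--     if not mentions:
--         return ["*No recent notes mentioning this project.*", ""]
--
--     lines = []
--     current_date = ""
--     for date_str, note_line in mentions:
--         if date_str != current_date:
--             if current_date:
--                 lines.append("")
--             lines.append(f"**[[{date_str}]]**")
--             current_date = date_str
--         lines.append(note_line)
--     lines.append("")
--     return lines
-- ===== SOURCE B (Python) =====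
-- def _section_lines(mentions: list[tuple[str, str]], prev_date: str) -> list[str]:
--     """Lines for the remaining mentions, given the date of the preceding mention."""
--     if not mentions:
--         return []
--     date_str, note_line = mentions[0]
--     rest = _section_lines(mentions[1:], date_str)
--     if date_str == prev_date:
--         return [note_line] + rest
--     return ([""] if prev_date else []) + [f"**[[{date_str}]]**", note_line] + rest
--
--
-- def _build_notes_section(mentions: list[tuple[str, str]]) -> list[str]:
--     """Build a bullet list of recent notes mentioning the project."""
--     if not mentions:
--         return ["*No recent notes mentioning this project.*", ""]
--     return _section_lines(mentions, "") + [""]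
-- ===== Notes on version B (the rewrite author's own statement) =====
-- stated objective: alternative
-- what changed: B replaces A's imperative loop mutating a (lines, current_date) accumulator by a pure structural recursion: a helper threads the previous mention's date as a parameter and builds each list segment by prepending, with the empty-mentions guard kept at the top.
import Mathlib
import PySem

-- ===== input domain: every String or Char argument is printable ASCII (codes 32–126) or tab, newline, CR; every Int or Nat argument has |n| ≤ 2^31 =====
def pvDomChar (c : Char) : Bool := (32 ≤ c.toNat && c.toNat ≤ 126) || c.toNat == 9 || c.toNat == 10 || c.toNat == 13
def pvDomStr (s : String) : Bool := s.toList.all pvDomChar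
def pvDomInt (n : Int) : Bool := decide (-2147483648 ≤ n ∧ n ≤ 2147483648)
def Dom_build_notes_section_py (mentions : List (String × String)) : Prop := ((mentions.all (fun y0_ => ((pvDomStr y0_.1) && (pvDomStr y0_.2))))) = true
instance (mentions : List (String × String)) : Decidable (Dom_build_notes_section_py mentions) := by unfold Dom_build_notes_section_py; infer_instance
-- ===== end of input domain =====

-- B replaces A's imperative loop over a (lines, current_date) accumulator by a pure
-- structural recursion threading the previous date as a parameter (objective: alternative).

-- ===== PORT A =====
-- the loop body: state is (lines, current_date)
def pvAStep (st : List String × String) (m : String × String) : List String × String :=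
  let (lines, current_date) := st
  let (date_str, note_line) := m
  let (lines, current_date) :=
    if date_str ≠ current_date then
      (((if current_date ≠ "" then lines ++ [""] else lines)) ++ ["**[[" ++ date_str ++ "]]**"], date_str)
    else (lines, current_date)
  (lines ++ [note_line], current_date)

def build_notes_section_py (mentions : List (String × String)) : List String :=
  if mentions = [] then ["*No recent notes mentioning this project.*", ""]
  else
    let st := mentions.foldl pvAStep ([], "")
    st.1 ++ [""]

-- ===== PORT B =====
-- Source B's _section_lines: structural recursion, previous date threaded as a parameter
def pvSectionLines : List (String × String) → String → List String
  | [], _ => []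
  | (date_str, note_line) :: t, prev_date =>
      let rest := pvSectionLines t date_str
      if date_str == prev_date then note_line :: rest
      else (if prev_date ≠ "" then [""] else [])
            ++ ("**[[" ++ date_str ++ "]]**") :: note_line :: rest

def build_notes_section_py_alt (mentions : List (String × String)) : List String :=
  if mentions = [] then ["*No recent notes mentioning this project.*", ""]
  else pvSectionLines mentions "" ++ [""]

-- ===== PRECONDITION & SPEC =====
def Spec_build_notes_section_py (mentions : List (String × String)) (out : List String) : Prop := out = build_notes_section_py_alt mentions
instance (mentions : List (String × String)) (out : List String) : Decidable (Spec_build_notes_section_py mentions out) := by unfold Spec_build_notes_section_py; infer_instance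

-- ===== CLAIM (what is proved, stated in full; the proofs are below) =====
def Claim_equal_build_notes_section_py : Prop := ∀ (mentions : List (String × String)), Dom_build_notes_section_py mentions → Spec_build_notes_section_py mentions (build_notes_section_py mentions)

-- ===== LEMMAS AND PROOFS =====

-- the lines A's loop appends after state current_date = cur
def pvTailOut (cur : String) : List (String × String) → List String
  | [] => []
  | (d, n) :: t =>
      (if d ≠ cur then (if cur ≠ "" then [""] else []) ++ ["**[[" ++ d ++ "]]**"] else [])
        ++ n :: pvTailOut d t

theorem pvA_foldl (ms : List (String × String)) :
    ∀ (lines : List String) (cur : String),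
    (ms.foldl pvAStep (lines, cur)).1 = lines ++ pvTailOut cur ms := by
  induction ms with
  | nil => intro lines cur; simp [pvTailOut]
  | cons m t ih =>
      intro lines cur
      obtain ⟨d, n⟩ := m
      by_cases h : d = cur
      · subst h
        simp [List.foldl_cons, pvAStep, pvTailOut, ih]
      · simp [List.foldl_cons, pvAStep, pvTailOut, h, ih]
        by_cases hc : cur = "" <;> simp [hc]

theorem pvTail_eq_section (ms : List (String × String)) :
    ∀ (cur : String), pvTailOut cur ms = pvSectionLines ms cur := by
  induction ms with
  | nil => intro cur; simp [pvTailOut, pvSectionLines]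
  | cons m t ih =>
      intro cur
      obtain ⟨d, n⟩ := m
      by_cases h : d = cur
      · subst h
        simp [pvTailOut, pvSectionLines, ih]
      · simp [pvTailOut, pvSectionLines, h, ih]

-- ===== VERDICT (by name: the statement is the Claim_ definition above) =====
theorem build_notes_section_py_spec : Claim_equal_build_notes_section_py := by
  intro ms _
  unfold Spec_build_notes_section_py
  by_cases h : ms = []
  · simp [h, build_notes_section_py, build_notes_section_py_alt]
  · unfold build_notes_section_py build_notes_section_py_alt
    rw [if_neg h, if_neg h]
    show (ms.foldl pvAStep ([], "")).1 ++ [""] = pvSectionLines ms "" ++ [""]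
    rw [pvA_foldl, pvTail_eq_section]
    simp
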